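-- pv_equiv track=rewrite | github.com/soulaymazay/OCR__Intelligent | ocr_intelligent/api/ocr_api.py | _structurer_champs
-- ===== SOURCE A (Python) =====
-- def _structurer_champs(champs, type_document):
--     """
--     Structure et nettoie les champs extraits
--     Retourne un dictionnaire avec les clés standardisées
--     """
--     champs_structures = {}
--
--     # Mapping des champs possibles
--     mapping_standard = {
--         "date": ["date", "date_facture", "date_emission"],
--         "date_echeance": ["date_echeance", "date_paiement", "date_due"],
--         "date_livraison": ["date_livraison", "date_bl"],
--         "date_commande": ["date_commande", "date_bc"],
--         "numero_facture": ["numero_facture", "num_facture", "facture_no", "invoice_no"],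
--         "numero_bl": ["numero_bl", "num_bl", "bl_no", "lr_no"],
--         "numero_commande": ["numero_commande", "num_commande", "commande_no", "po_no"],
--         "numero_cheque": ["numero_cheque", "num_cheque", "cheque_no"],
--         "montant_ht": ["montant_ht", "montant_hors_taxe", "net_total"],
--         "montant_tva": ["montant_tva", "montant_taxe", "tva", "total_taxes"],
--         "montant_ttc": ["montant_ttc", "montant_total", "total", "grand_total"],
--         "montant": ["montant", "amount", "paid_amount"],
--         "fournisseur": ["fournisseur", "supplier", "vendeur", "societe"],
--         "client": ["client", "customer", "destinataire", "acheteur"],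
--         "banque": ["banque", "bank", "nom_banque"],
--     }
--
--     # Inverser le mapping pour la recherche
--     champs_lower = {k.lower(): (k, v) for k, v in champs.items()}
--
--     for champ_standard, aliases in mapping_standard.items():
--         for alias in aliases:
--             if alias.lower() in champs_lower:
--                 _, valeur = champs_lower[alias.lower()]
--                 if valeur:  # Ne pas ajouter les valeurs vides
--                     champs_structures[champ_standard] = valeur
--                 break
--
--     return champs_structures
-- ===== SOURCE B (Python) =====
-- _MAPPING = {
--     "date": ["date", "date_facture", "date_emission"],
--     "date_echeance": ["date_echeance", "date_paiement", "date_due"],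
--     "date_livraison": ["date_livraison", "date_bl"],
--     "date_commande": ["date_commande", "date_bc"],
--     "numero_facture": ["numero_facture", "num_facture", "facture_no", "invoice_no"],
--     "numero_bl": ["numero_bl", "num_bl", "bl_no", "lr_no"],
--     "numero_commande": ["numero_commande", "num_commande", "commande_no", "po_no"],
--     "numero_cheque": ["numero_cheque", "num_cheque", "cheque_no"],
--     "montant_ht": ["montant_ht", "montant_hors_taxe", "net_total"],
--     "montant_tva": ["montant_tva", "montant_taxe", "tva", "total_taxes"],
--     "montant_ttc": ["montant_ttc", "montant_total", "total", "grand_total"],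
--     "montant": ["montant", "amount", "paid_amount"],
--     "fournisseur": ["fournisseur", "supplier", "vendeur", "societe"],
--     "client": ["client", "customer", "destinataire", "acheteur"],
--     "banque": ["banque", "bank", "nom_banque"],
-- }
--
-- # Inverted index: lowercase alias -> (standard field, priority of the alias in its list)
-- _INDEX = {alias.lower(): (std, pos)
--           for std, aliases in _MAPPING.items()
--           for pos, alias in enumerate(aliases)}
--
--
-- def _structurer_champs(champs, type_document):
--     """One pass over the lowercased view with an inverted alias index."""
--     view = {k.lower(): v for k, v in champs.items()}
--     best = {}  # standard -> (alias priority, value) with the smallest priority kept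
--     for key, value in view.items():
--         hit = _INDEX.get(key)
--         if hit is not None:
--             std, pos = hit
--             cur = best.get(std)
--             if cur is None or pos < cur[0]:
--                 best[std] = (pos, value)
--     return {std: best[std][1] for std in _MAPPING if std in best and best[std][1]}
-- ===== Notes on version B (the rewrite author's own statement) =====
-- stated objective: alternative
-- what changed: Replaces A's per-standard scan over alias lists with membership tests into the input with a precomputed inverted index (lowercase alias -> (standard, priority)) and a single pass over the lowercased input view keeping the smallest-priority candidate per standard.
import Mathlib
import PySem

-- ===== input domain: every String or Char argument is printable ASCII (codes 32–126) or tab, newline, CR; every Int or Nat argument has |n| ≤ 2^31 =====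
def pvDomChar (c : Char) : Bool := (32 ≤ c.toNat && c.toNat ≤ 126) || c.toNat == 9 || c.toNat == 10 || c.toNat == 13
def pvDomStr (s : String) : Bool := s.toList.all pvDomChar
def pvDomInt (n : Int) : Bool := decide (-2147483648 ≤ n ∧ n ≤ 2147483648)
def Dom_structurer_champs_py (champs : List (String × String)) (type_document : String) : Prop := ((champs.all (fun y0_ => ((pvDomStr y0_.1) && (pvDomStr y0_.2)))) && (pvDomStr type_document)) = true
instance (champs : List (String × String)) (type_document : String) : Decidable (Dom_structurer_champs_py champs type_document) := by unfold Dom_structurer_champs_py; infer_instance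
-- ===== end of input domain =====

set_option maxRecDepth 100000

-- B replaces A's per-standard scan of alias lists with a precomputed inverted alias index and a
-- single pass over the lowercased input view (alternative decomposition, same exact behaviour).

-- ===== PORT A =====
-- the literal mapping_standard table of A (B's Python carries the same module-level constant)
def pvMapping : List (String × List String) := [
  ("date", ["date", "date_facture", "date_emission"]),
  ("date_echeance", ["date_echeance", "date_paiement", "date_due"]),
  ("date_livraison", ["date_livraison", "date_bl"]),
  ("date_commande", ["date_commande", "date_bc"]),
  ("numero_facture", ["numero_facture", "num_facture", "facture_no", "invoice_no"]),
  ("numero_bl", ["numero_bl", "num_bl", "bl_no", "lr_no"]),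
  ("numero_commande", ["numero_commande", "num_commande", "commande_no", "po_no"]),
  ("numero_cheque", ["numero_cheque", "num_cheque", "cheque_no"]),
  ("montant_ht", ["montant_ht", "montant_hors_taxe", "net_total"]),
  ("montant_tva", ["montant_tva", "montant_taxe", "tva", "total_taxes"]),
  ("montant_ttc", ["montant_ttc", "montant_total", "total", "grand_total"]),
  ("montant", ["montant", "amount", "paid_amount"]),
  ("fournisseur", ["fournisseur", "supplier", "vendeur", "societe"]),
  ("client", ["client", "customer", "destinataire", "acheteur"]),
  ("banque", ["banque", "bank", "nom_banque"])]

-- A's inner 'for alias in aliases: … break' loop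
def pvInner (cl : PySem.Dict String (String × String)) (acc : PySem.Dict String String)
    (std : String) : List String → PySem.Dict String String
  | [] => acc
  | a :: rest =>
    if cl.contains (PySem.Str.lower a) then
      match cl.get? (PySem.Str.lower a) with
      | some kv => if kv.2 ≠ "" then acc.insert std kv.2 else acc
      | none => acc
    else pvInner cl acc std rest

def structurer_champs_py (champs : List (String × String)) (type_document : String) : List (String × String) :=
  let champs_lower : PySem.Dict String (String × String) :=
    champs.foldl (fun d kv => d.insert (PySem.Str.lower kv.1) (kv.1, kv.2)) PySem.Dict.empty
  (pvMapping.foldl (fun acc p => pvInner champs_lower acc p.1 p.2) PySem.Dict.empty).items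

-- ===== PORT B =====
-- B's module-level inverted index _INDEX: lowercase alias -> (standard, priority)
def pvIndex : PySem.Dict String (String × Int) :=
  pvMapping.foldl (fun d p =>
    (PySem.List.enumerate p.2).foldl (fun d ia => d.insert (PySem.Str.lower ia.2) (p.1, ia.1)) d)
    PySem.Dict.empty

-- B's loop body: keep, per standard, the candidate with the smallest alias priority
def pvBStep (b : PySem.Dict String (Int × String)) (kv : String × String) :
    PySem.Dict String (Int × String) :=
  match pvIndex.get? kv.1 with
  | some hit =>
      match b.get? hit.1 with
      | some cur => if hit.2 < cur.1 then b.insert hit.1 (hit.2, kv.2) else b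
      | none => b.insert hit.1 (hit.2, kv.2)
  | none => b

def structurer_champs_py_alt (champs : List (String × String)) (type_document : String) : List (String × String) :=
  let view : PySem.Dict String String :=
    champs.foldl (fun d kv => d.insert (PySem.Str.lower kv.1) kv.2) PySem.Dict.empty
  let best : PySem.Dict String (Int × String) := view.items.foldl pvBStep PySem.Dict.empty
  (pvMapping.foldl (fun acc p =>
      match best.get? p.1 with
      | some pv => if pv.2 ≠ "" then acc.insert p.1 pv.2 else acc
      | none => acc) PySem.Dict.empty).items

-- ===== PRECONDITION & SPEC =====
def Spec_structurer_champs_py (champs : List (String × String)) (type_document : String) (out : List (String × String)) : Prop := out = structurer_champs_py_alt champs type_document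
instance (champs : List (String × String)) (type_document : String) (out : List (String × String)) : Decidable (Spec_structurer_champs_py champs type_document out) := by unfold Spec_structurer_champs_py; infer_instance

-- ===== CLAIM (what is proved, stated in full; the proofs are below) =====
def Claim_equal_structurer_champs_py : Prop := ∀ (champs : List (String × String)) (type_document : String), Dom_structurer_champs_py champs type_document → Spec_structurer_champs_py champs type_document (structurer_champs_py champs type_document)

-- ===== LEMMAS AND PROOFS =====

-- value of the first alias of `als` present in `view` (the quantity A's inner loop extracts)
def pvFindVal (view : PySem.Dict String String) : List String → Option String
  | [] => none
  | a :: rest =>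
    match view.get? (PySem.Str.lower a) with
    | some v => some v
    | none => pvFindVal view rest

-- per-key effect of pvBStep: keep the candidate with the smaller priority
def pvOstep (cur : Option (Int × String)) (pv : Int × String) : Option (Int × String) :=
  match cur with
  | none => some pv
  | some q => if pv.1 < q.1 then some pv else cur

-- the (priority, value) candidates for standard `std` among the entries `l`
def pvHits (std : String) (l : List (String × String)) : List (Int × String) :=
  l.filterMap (fun kv =>
    match pvIndex.get? kv.1 with
    | some hit => if hit.1 = std then some (hit.2, kv.2) else none
    | none => none)

-- pvIndex is exactly the alias table of (std, als): forward (every alias indexed at its position)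
-- and backward (nothing else is indexed to std)
def pvGood (std : String) (als : List String) : Bool :=
  ((List.range als.length).all fun i =>
      pvIndex.get? (PySem.Str.lower (als.getD i "")) == some (std, (i : Int)))
  && (pvIndex.items.all fun kv =>
      kv.2.1 != std ||
      (decide (0 ≤ kv.2.2) && decide (kv.2.2.toNat < als.length)
        && (PySem.Str.lower (als.getD kv.2.2.toNat "") == kv.1)))

theorem pvGoodAll : ∀ p ∈ pvMapping, pvGood p.1 p.2 = true := by decide

theorem pvRel (champs : List (String × String)) :
    ∀ (d : PySem.Dict String (String × String)) (d' : PySem.Dict String String),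
    (∀ x, (d.get? x).map Prod.snd = d'.get? x) →
    ∀ x, ((champs.foldl (fun d kv => d.insert (PySem.Str.lower kv.1) (kv.1, kv.2)) d).get? x).map Prod.snd
        = (champs.foldl (fun d kv => d.insert (PySem.Str.lower kv.1) kv.2) d').get? x := by
  induction champs with
  | nil => intro d d' h x; exact h x
  | cons kv t ih =>
      intro d d' h x
      simp only [List.foldl_cons]
      refine ih _ _ (fun y => ?_) x
      rw [PySem.Dict.get?_insert, PySem.Dict.get?_insert]
      split_ifs with hy
      · rfl
      · exact h y

theorem pvInner_eq (cl : PySem.Dict String (String × String)) (view : PySem.Dict String String)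
    (hrel : ∀ x, (cl.get? x).map Prod.snd = view.get? x) :
    ∀ als acc std, pvInner cl acc std als =
      match pvFindVal view als with
      | some v => if v ≠ "" then acc.insert std v else acc
      | none => acc := by
  intro als
  induction als with
  | nil => intro acc std; rfl
  | cons a rest ih =>
      intro acc std
      have h := hrel (PySem.Str.lower a)
      rw [pvInner, pvFindVal, PySem.Dict.contains_eq_isSome_get?]
      cases hc : cl.get? (PySem.Str.lower a) with
      | none =>
          rw [hc] at h
          cases hv : view.get? (PySem.Str.lower a) with
          | some v => rw [hv] at h; cases h
          | none =>
              simp only [Option.isSome_none, Bool.false_eq_true, if_false]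
              exact ih acc std
      | some kv =>
          rw [hc] at h
          cases hv : view.get? (PySem.Str.lower a) with
          | none => rw [hv] at h; cases h
          | some v =>
              rw [hv] at h
              simp only [Option.map_some, Option.some.injEq] at h
              simp only [Option.isSome_some, if_true, h]

theorem pvBestGet : ∀ (l : List (String × String)) (b : PySem.Dict String (Int × String)) (std : String),
    (l.foldl pvBStep b).get? std = (pvHits std l).foldl pvOstep (b.get? std) := by
  intro l
  induction l with
  | nil => intro b std; rfl
  | cons kv t ih =>
      intro b std
      rw [List.foldl_cons]
      cases hI : pvIndex.get? kv.1 with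
      | none =>
          have hstep : pvBStep b kv = b := by rw [pvBStep, hI]
          have hcons : pvHits std (kv :: t) = pvHits std t := by
            simp [pvHits, hI]
          rw [hstep, hcons, ih]
      | some hit =>
          by_cases hs : hit.1 = std
          · have hcons : pvHits std (kv :: t) = (hit.2, kv.2) :: pvHits std t := by
              simp [pvHits, hI, hs]
            have hb : (pvBStep b kv).get? std = pvOstep (b.get? std) (hit.2, kv.2) := by
              rw [pvBStep, hI, ← hs]
              cases hg : b.get? hit.1 with
              | none => simp [pvOstep, hg, PySem.Dict.get?_insert_self]
              | some cur =>
                  simp only [hg, pvOstep]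
                  by_cases hlt : hit.2 < cur.1
                  · simp [hlt, PySem.Dict.get?_insert_self]
                  · simp [hlt, hg]
            rw [ih, hb, hcons, List.foldl_cons]
          · have hcons : pvHits std (kv :: t) = pvHits std t := by
              simp [pvHits, hI, hs]
            have hb : (pvBStep b kv).get? std = b.get? std := by
              have hne : std ≠ hit.1 := fun h => hs h.symm
              rw [pvBStep, hI]
              cases hg : b.get? hit.1 with
              | none => simp [hg, PySem.Dict.get?_insert, hne]
              | some cur =>
                  by_cases hlt : hit.2 < cur.1
                  · simp [hg, hlt, PySem.Dict.get?_insert, hne]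
                  · simp [hg, hlt]
            rw [ih, hb, hcons]

theorem pvOstep_spec (c : Option (Int × String)) (a : Int × String) :
    ∃ r, pvOstep c a = some r ∧ r.1 ≤ a.1 ∧ (∀ q, c = some q → r.1 ≤ q.1) := by
  cases c with
  | none => exact ⟨a, rfl, le_refl _, by intro q h; cases h⟩
  | some q =>
      by_cases h : a.1 < q.1
      · exact ⟨a, by simp [pvOstep, h], le_refl _, by intro p hp; cases hp; omega⟩
      · exact ⟨q, by simp [pvOstep, h], by omega, by intro p hp; cases hp; exact le_refl _⟩

theorem pvFold_none : ∀ (l : List (Int × String)) (c : Option (Int × String)),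
    l.foldl pvOstep c = none → c = none ∧ l = [] := by
  intro l
  induction l with
  | nil => intro c h; exact ⟨h, rfl⟩
  | cons a t ih =>
      intro c h
      rw [List.foldl_cons] at h
      obtain ⟨r, hr, -⟩ := pvOstep_spec c a
      have := (ih _ h).1
      rw [hr] at this; cases this

theorem pvFold_mem : ∀ (l : List (Int × String)) (c : Option (Int × String)) x,
    l.foldl pvOstep c = some x → c = some x ∨ x ∈ l := by
  intro l
  induction l with
  | nil => intro c x h; exact Or.inl h
  | cons a t ih =>
      intro c x h
      rw [List.foldl_cons] at h
      rcases ih _ _ h with h1 | h2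
      · cases c with
        | none =>
            simp only [pvOstep] at h1
            cases h1; exact Or.inr (List.mem_cons_self)
        | some q =>
            simp only [pvOstep] at h1
            split_ifs at h1
            · cases h1; exact Or.inr (List.mem_cons_self)
            · exact Or.inl h1
      · exact Or.inr (List.mem_cons_of_mem _ h2)

theorem pvFold_min : ∀ (l : List (Int × String)) (c : Option (Int × String)) x,
    l.foldl pvOstep c = some x →
    (∀ q, c = some q → x.1 ≤ q.1) ∧ (∀ y ∈ l, x.1 ≤ y.1) := by
  intro l
  induction l with
  | nil =>
      intro c x h
      simp only [List.foldl_nil] at h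
      exact ⟨fun q hq => by rw [h] at hq; cases hq; exact le_refl _, by simp⟩
  | cons a t ih =>
      intro c x h
      rw [List.foldl_cons] at h
      obtain ⟨r, hr, hra, hrc⟩ := pvOstep_spec c a
      obtain ⟨h1, h2⟩ := ih _ _ h
      have hxr : x.1 ≤ r.1 := h1 r hr
      refine ⟨fun q hq => le_trans hxr (hrc q hq), ?_⟩
      intro y hy
      rcases List.mem_cons.mp hy with rfl | hyt
      · exact le_trans hxr hra
      · exact h2 y hyt

theorem pvHits_mem_of {std : String} {l : List (String × String)} {kv : String × String} {p : Int}
    (hmem : kv ∈ l) (hidx : pvIndex.get? kv.1 = some (std, p)) : (p, kv.2) ∈ pvHits std l := by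
  rw [pvHits, List.mem_filterMap]
  exact ⟨kv, hmem, by rw [hidx]; simp⟩

theorem pvHits_mem_elim {std : String} {l : List (String × String)} {y : Int × String}
    (h : y ∈ pvHits std l) :
    ∃ kv, kv ∈ l ∧ pvIndex.get? kv.1 = some (std, y.1) ∧ y.2 = kv.2 := by
  rw [pvHits, List.mem_filterMap] at h
  obtain ⟨kv, hmem, heq⟩ := h
  refine ⟨kv, hmem, ?_⟩
  split at heq
  next hit hI =>
    split_ifs at heq with hs
    · cases heq
      exact ⟨by rw [hI, ← hs], rfl⟩
  next => cases heq

theorem pvFindVal_none (view : PySem.Dict String String) :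
    ∀ als, (∀ a ∈ als, view.get? (PySem.Str.lower a) = none) → pvFindVal view als = none := by
  intro als
  induction als with
  | nil => intro _; rfl
  | cons a rest ih =>
      intro h
      rw [pvFindVal, h a List.mem_cons_self]
      exact ih (fun b hb => h b (List.mem_cons_of_mem _ hb))

theorem pvFindVal_some (view : PySem.Dict String String) :
    ∀ als (p : Nat) v, p < als.length →
    view.get? (PySem.Str.lower (als.getD p "")) = some v →
    (∀ j, j < p → view.get? (PySem.Str.lower (als.getD j "")) = none) →
    pvFindVal view als = some v := by
  intro als
  induction als with
  | nil => intro p v hp _ _; simp at hp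
  | cons a rest ih =>
      intro p v hp hv hmin
      cases p with
      | zero => rw [pvFindVal]; rw [List.getD_cons_zero] at hv; rw [hv]
      | succ p' =>
          have h0 := hmin 0 (Nat.succ_pos _)
          rw [List.getD_cons_zero] at h0
          rw [pvFindVal, h0]
          rw [List.getD_cons_succ] at hv
          refine ih p' v (by simpa using hp) hv (fun j hj => ?_)
          have := hmin (j + 1) (by omega)
          rwa [List.getD_cons_succ] at this

theorem pvGlue (view : PySem.Dict String String) (hn : view.keys.Nodup)
    (std : String) (als : List String) (hg : pvGood std als = true) :
    ((pvHits std view.items).foldl pvOstep none).map Prod.snd = pvFindVal view als := by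
  rw [pvGood, Bool.and_eq_true, List.all_eq_true, List.all_eq_true] at hg
  obtain ⟨hg1, hg2⟩ := hg
  have H1 : ∀ i, i < als.length →
      pvIndex.get? (PySem.Str.lower (als.getD i "")) = some (std, (i : Int)) := by
    intro i hi
    have := hg1 i (List.mem_range.mpr hi)
    exact eq_of_beq this
  have H2 : ∀ kv ∈ pvIndex.items, kv.2.1 = std →
      0 ≤ kv.2.2 ∧ kv.2.2.toNat < als.length ∧
      PySem.Str.lower (als.getD kv.2.2.toNat "") = kv.1 := by
    intro kv hkv hstd
    have := hg2 kv hkv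
    rw [Bool.or_eq_true, bne_iff_ne] at this
    rcases this with h | h
    · exact absurd hstd h
    · rw [Bool.and_eq_true, Bool.and_eq_true] at h
      exact ⟨of_decide_eq_true h.1.1, of_decide_eq_true h.1.2, eq_of_beq h.2⟩
  cases hfold : (pvHits std view.items).foldl pvOstep none with
  | none =>
      have hempty := (pvFold_none _ _ hfold).2
      rw [Option.map_none]
      refine (pvFindVal_none view als (fun a ha => ?_)).symm
      cases hv : view.get? (PySem.Str.lower a) with
      | none => rfl
      | some v =>
          obtain ⟨i, hi, rfl⟩ := List.mem_iff_getElem.mp ha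
          have hgetD : als.getD i "" = als[i] := List.getD_eq_getElem als "" hi
          have hIdx := H1 i hi
          rw [hgetD] at hIdx
          have hmem : (PySem.Str.lower als[i], v) ∈ view.items :=
            (PySem.Dict.get?_eq_some_iff_mem_items _ _ _ hn).mp hv
          have := pvHits_mem_of hmem hIdx
          rw [hempty] at this
          cases this
  | some x =>
      rcases pvFold_mem _ _ _ hfold with hc | hx
      · cases hc
      obtain ⟨kv, hkvmem, hIdx, hx2⟩ := pvHits_mem_elim hx
      have hmin := (pvFold_min _ _ _ hfold).2
      have hkvIdx : (kv.1, (std, x.1)) ∈ pvIndex.items :=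
        PySem.Dict.mem_items_of_get?_eq_some _ hIdx
      obtain ⟨hpos, hlen, hal⟩ := H2 _ hkvIdx rfl
      have hx1 : (x.1.toNat : Int) = x.1 := Int.toNat_of_nonneg hpos
      have hview : view.get? kv.1 = some kv.2 :=
        (PySem.Dict.get?_eq_some_iff_mem_items _ _ _ hn).mpr hkvmem
      have hminj : ∀ j, j < x.1.toNat →
          view.get? (PySem.Str.lower (als.getD j "")) = none := by
        intro j hj
        cases hv : view.get? (PySem.Str.lower (als.getD j "")) with
        | none => rfl
        | some w =>
            have hIdxj := H1 j (Nat.lt_trans hj hlen)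
            have hmemj : (PySem.Str.lower (als.getD j ""), w) ∈ view.items :=
              (PySem.Dict.get?_eq_some_iff_mem_items _ _ _ hn).mp hv
            have hhit := pvHits_mem_of hmemj hIdxj
            have := hmin _ hhit
            simp only at this
            omega
      have hfv : pvFindVal view als = some kv.2 :=
        pvFindVal_some view als x.1.toNat kv.2 hlen (by rw [hal]; exact hview) hminj
      rw [Option.map_some, hfv, hx2]

theorem structurer_champs_py_spec : Claim_equal_structurer_champs_py := by
  intro champs type_document _
  unfold Spec_structurer_champs_py
  simp only [structurer_champs_py, structurer_champs_py_alt]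
  have hrel : ∀ x,
      ((champs.foldl (fun d kv => d.insert (PySem.Str.lower kv.1) (kv.1, kv.2)) PySem.Dict.empty).get? x).map Prod.snd
      = (champs.foldl (fun d kv => d.insert (PySem.Str.lower kv.1) kv.2) PySem.Dict.empty).get? x :=
    pvRel champs PySem.Dict.empty PySem.Dict.empty
      (fun x => by rw [PySem.Dict.get?_empty, PySem.Dict.get?_empty]; rfl)
  have hn : (champs.foldl (fun d kv => d.insert (PySem.Str.lower kv.1) kv.2) PySem.Dict.empty).keys.Nodup :=
    PySem.Dict.nodup_keys_foldl_insert_key champs (fun kv => PySem.Str.lower kv.1)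
      (fun _ kv => kv.2) PySem.Dict.empty PySem.Dict.nodup_keys_empty
  congr 1
  refine PySem.List.foldl_congr_mem _ _ _ _ (fun acc p hp => ?_)
  rw [pvInner_eq _ _ hrel p.2 acc p.1]
  rw [pvBestGet _ PySem.Dict.empty p.1, PySem.Dict.get?_empty]
  have hglue := pvGlue _ hn p.1 p.2 (pvGoodAll p hp)
  cases hfold : (pvHits p.1 (champs.foldl (fun d kv => d.insert (PySem.Str.lower kv.1) kv.2) PySem.Dict.empty).items).foldl pvOstep none with
  | none =>
      rw [hfold, Option.map_none] at hglue
      rw [← hglue]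
  | some pv =>
      rw [hfold, Option.map_some] at hglue
      rw [← hglue]
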